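-- pv_equiv track=rewrite | github.com/twotwobread/coding_test_study | twotwobread/4주차/13428_숫자조작.py | solution
-- ===== SOURCE A (Python) =====
-- def solution(num, length):
--     max_value = 0
--     for i in range(length): max_value += num[i] * (10 ** ((length-1) - i))
--     min_value = max_value
--     copy_num = num.copy()
--     for i in range(0, length-1):
--         for j in range(i+1,length):
--             if (i==0 and num[j]==0):
--                 continue
--             if num[i] != num[j]:
--                 num[i], num[j] = num[j], num[i]
--                 compare = 0
--                 for k in range(length): compare += num[k] * (10 ** ((length - 1) - k))
--                 if max_value < compare:
--                     max_value = compare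
--                 if min_value > compare:
--                     min_value = compare
--                 num = copy_num.copy()
--     return min_value, max_value
-- ===== SOURCE B (Python) =====
-- def solution(num, length):
--     pw = [10 ** (length - 1 - k) for k in range(length)]
--     base = 0
--     for i in range(length):
--         base += num[i] * pw[i]
--     mx = base
--     mn = base
--     for i in range(0, length - 1):
--         for j in range(i + 1, length):
--             if i == 0 and num[j] == 0:
--                 continue
--             if num[i] != num[j]:
--                 cand = base + (num[j] - num[i]) * (pw[i] - pw[j])
--                 if mx < cand:
--                     mx = cand
--                 if mn > cand:
--                     mn = cand
--     return mn, mx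
-- ===== Notes on version B (the rewrite author's own statement) =====
-- stated objective: faster
-- what changed: Instead of re-evaluating the whole number digit-by-digit after every swap (A's inner O(length) loop per pair), B precomputes the base value and a power table once and scores each swap with a constant-time delta base + (num[j]-num[i])*(10^(L-1-i) - 10^(L-1-j)).
import Mathlib
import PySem

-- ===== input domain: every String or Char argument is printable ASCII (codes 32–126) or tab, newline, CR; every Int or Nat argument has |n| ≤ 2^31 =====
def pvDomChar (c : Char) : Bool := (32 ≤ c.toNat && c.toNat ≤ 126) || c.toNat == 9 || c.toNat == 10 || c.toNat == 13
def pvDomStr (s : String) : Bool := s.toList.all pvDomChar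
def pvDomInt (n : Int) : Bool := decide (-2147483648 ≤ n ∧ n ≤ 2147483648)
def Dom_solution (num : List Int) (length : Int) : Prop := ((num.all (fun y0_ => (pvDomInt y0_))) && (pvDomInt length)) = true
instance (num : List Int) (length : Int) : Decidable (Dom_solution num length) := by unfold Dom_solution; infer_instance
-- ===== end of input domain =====

-- B replaces A's O(length) revaluation of the whole number after every swap by a
-- constant-time swap delta against the precomputed base value and power table (asymptotically faster).
-- Note: Python A mutates its `num` argument in place (the first performed swap is left
-- in the caller's list); the equivalence proved here is about the RETURN value only — B does not mutate.

-- ===== PORT A =====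
-- A's full revaluation loop: compare = Σ num[k] * 10^((length-1)-k) over range(length)
def pvValA (l : List Int) (length : Int) : Int :=
  (PySem.List.pyRange 0 length 1).foldl
    (fun acc k => acc + PySem.List.pyGetD l k 0 * (10 : Int) ^ ((length - 1 - k).toNat)) 0

def solution (num : List Int) (length : Int) : List Int :=
  let max_value := pvValA num length
  let min_value := max_value
  let copy_num := num
  let st := (PySem.List.pyRange 0 (length - 1) 1).foldl (fun st i =>
    (PySem.List.pyRange (i + 1) length 1).foldl (fun st j =>
      if i = 0 ∧ PySem.List.pyGetD st.1 j 0 = 0 then st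
      else if PySem.List.pyGetD st.1 i 0 ≠ PySem.List.pyGetD st.1 j 0 then
        -- num[i], num[j] = num[j], num[i]; compare = full revaluation of the swapped list
        (copy_num,
         if st.2.1 < pvValA (PySem.List.pySetD (PySem.List.pySetD st.1 i (PySem.List.pyGetD st.1 j 0)) j (PySem.List.pyGetD st.1 i 0)) length
           then pvValA (PySem.List.pySetD (PySem.List.pySetD st.1 i (PySem.List.pyGetD st.1 j 0)) j (PySem.List.pyGetD st.1 i 0)) length else st.2.1,
         if st.2.2 > pvValA (PySem.List.pySetD (PySem.List.pySetD st.1 i (PySem.List.pyGetD st.1 j 0)) j (PySem.List.pyGetD st.1 i 0)) length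
           then pvValA (PySem.List.pySetD (PySem.List.pySetD st.1 i (PySem.List.pyGetD st.1 j 0)) j (PySem.List.pyGetD st.1 i 0)) length else st.2.2)
      else st) st) (num, max_value, min_value)
  [st.2.2, st.2.1]

-- ===== PORT B =====
def solution_alt (num : List Int) (length : Int) : List Int :=
  let pw := (PySem.List.pyRange 0 length 1).map (fun k => (10 : Int) ^ ((length - 1 - k).toNat))
  let base := (PySem.List.pyRange 0 length 1).foldl
    (fun acc i => acc + PySem.List.pyGetD num i 0 * PySem.List.pyGetD pw i 0) 0
  let st := (PySem.List.pyRange 0 (length - 1) 1).foldl (fun st i =>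
    (PySem.List.pyRange (i + 1) length 1).foldl (fun st j =>
      if i = 0 ∧ PySem.List.pyGetD num j 0 = 0 then st
      else if PySem.List.pyGetD num i 0 ≠ PySem.List.pyGetD num j 0 then
        (if st.1 < base + (PySem.List.pyGetD num j 0 - PySem.List.pyGetD num i 0) * (PySem.List.pyGetD pw i 0 - PySem.List.pyGetD pw j 0)
           then base + (PySem.List.pyGetD num j 0 - PySem.List.pyGetD num i 0) * (PySem.List.pyGetD pw i 0 - PySem.List.pyGetD pw j 0) else st.1,
         if st.2 > base + (PySem.List.pyGetD num j 0 - PySem.List.pyGetD num i 0) * (PySem.List.pyGetD pw i 0 - PySem.List.pyGetD pw j 0)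
           then base + (PySem.List.pyGetD num j 0 - PySem.List.pyGetD num i 0) * (PySem.List.pyGetD pw i 0 - PySem.List.pyGetD pw j 0) else st.2)
      else st) st) (base, base)
  [st.2, st.1]

-- ===== PRECONDITION & SPEC =====
-- Pre_ excludes exactly the inputs where Python A raises IndexError: a positive
-- `length` larger than len(num) (for length ≤ 0 A indexes nothing and returns (0, 0)).
def Pre_solution (num : List Int) (length : Int) : Prop :=
  length ≤ (num.length : Int) ∨ length ≤ 0
instance (num : List Int) (length : Int) : Decidable (Pre_solution num length) := by
  unfold Pre_solution; infer_instance

def pvWitness_solution : List Int × Int := ([1, 2, 0], 3)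

def Spec_solution (num : List Int) (length : Int) (out : List Int) : Prop := out = solution_alt num length
instance (num : List Int) (length : Int) (out : List Int) : Decidable (Spec_solution num length out) := by unfold Spec_solution; infer_instance

-- ===== CLAIM (what is proved, stated in full; the proofs are below) =====
def Claim_equal_solution : Prop := ∀ (num : List Int) (length : Int), Dom_solution num length → Pre_solution num length → Spec_solution num length (solution num length)

-- ===== LEMMAS AND PROOFS =====

theorem pvSum_map_range (f : Nat → Int) (n : Nat) :
    ((List.range n).map f).sum = ∑ k ∈ Finset.range n, f k := by
  induction n with
  | zero => simp
  | succ m ih => simp [List.range_succ, Finset.sum_range_succ, ih]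

-- pvValA as a Finset sum over Nat indices
theorem pvValA_eq_sum (l : List Int) (L : Int) :
    pvValA l L = ∑ k ∈ Finset.range L.toNat, l.getD k 0 * (10 : Int) ^ (L.toNat - 1 - k) := by
  unfold pvValA
  rw [PySem.List.pyRange_one, PySem.List.foldl_add, List.map_map,
      ← pvSum_map_range (fun k => l.getD k 0 * (10 : Int) ^ (L.toNat - 1 - k)) L.toNat]
  simp only [zero_add, sub_zero]
  congr 1
  apply List.map_congr_left
  intro k hk
  simp only [List.mem_range] at hk
  simp only [Function.comp_apply, PySem.List.pyGetD_natCast]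
  congr 2
  omega

-- the swap delta: revaluing the list with positions i and j exchanged equals
-- base + (l[j] - l[i]) * (w i - w j)
theorem pvVal_swap (l : List Int) (L i j : Int)
    (h0 : 0 ≤ i) (hij : i < j) (hj : j < L) (hlen : L ≤ (l.length : Int)) :
    pvValA (PySem.List.pySetD (PySem.List.pySetD l i (PySem.List.pyGetD l j 0)) j (PySem.List.pyGetD l i 0)) L
      = pvValA l L + (PySem.List.pyGetD l j 0 - PySem.List.pyGetD l i 0)
          * ((10 : Int) ^ ((L - 1 - i).toNat) - (10 : Int) ^ ((L - 1 - j).toNat)) := by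
  have hiL : i < (l.length : Int) := by omega
  have hjL : j < (l.length : Int) := by omega
  set n := L.toNat with hn
  set a := PySem.List.pyGetD l i 0 with ha
  set b := PySem.List.pyGetD l j 0 with hb
  have hseti : PySem.List.pySetD l i b = l.set i.toNat b :=
    PySem.List.pySetD_of_nonneg l b h0
  have hsetj : PySem.List.pySetD (l.set i.toNat b) j a = (l.set i.toNat b).set j.toNat a :=
    PySem.List.pySetD_of_nonneg _ a (by omega)
  have hil : i.toNat < l.length := by omega
  have hjl : j.toNat < l.length := by omega
  have hgi : a = l.getD i.toNat 0 := by
    rw [ha, PySem.List.pyGetD_eq_getElem l 0 h0 hiL, List.getD_eq_getElem l 0 hil]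
  have hgj : b = l.getD j.toNat 0 := by
    rw [hb, PySem.List.pyGetD_eq_getElem l 0 (by omega) hjL, List.getD_eq_getElem l 0 hjl]
  rw [hseti, hsetj, pvValA_eq_sum, pvValA_eq_sum]
  have key : ∀ k ∈ Finset.range n,
      ((l.set i.toNat b).set j.toNat a).getD k 0 * (10 : Int) ^ (n - 1 - k)
        = (if k = j.toNat then a * (10 : Int) ^ (n - 1 - k) - b * (10 : Int) ^ (n - 1 - k) else 0)
          + (if k = i.toNat then b * (10 : Int) ^ (n - 1 - k) - a * (10 : Int) ^ (n - 1 - k) else 0)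
          + l.getD k 0 * (10 : Int) ^ (n - 1 - k) := by
    intro k hk
    simp only [Finset.mem_range] at hk
    have hkl : k < l.length := by omega
    rw [List.getD_eq_getElem _ 0 (by simpa using hkl)]
    by_cases hkj : k = j.toNat
    · subst hkj
      rw [List.getElem_set_self (by simpa using hjl)]
      rw [if_pos rfl, if_neg (show j.toNat ≠ i.toNat by omega)]
      rw [List.getD_eq_getElem l 0 hjl] at hgj
      rw [List.getD_eq_getElem l 0 hjl, ← hgj]
      ring
    · rw [List.getElem_set_ne (by omega)]
      by_cases hki : k = i.toNat
      · subst hki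
        rw [List.getElem_set_self (by simpa using hil), if_neg hkj, if_pos rfl]
        rw [List.getD_eq_getElem l 0 hil] at hgi
        rw [List.getD_eq_getElem l 0 hil, ← hgi]
        ring
      · rw [List.getElem_set_ne (by omega), if_neg hkj, if_neg hki,
            List.getD_eq_getElem l 0 hkl]
        ring
  rw [Finset.sum_congr rfl key]
  rw [Finset.sum_add_distrib, Finset.sum_add_distrib]
  rw [Finset.sum_ite_eq' (Finset.range n) j.toNat
        (fun k => a * (10 : Int) ^ (n - 1 - k) - b * (10 : Int) ^ (n - 1 - k))]
  rw [Finset.sum_ite_eq' (Finset.range n) i.toNat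
        (fun k => b * (10 : Int) ^ (n - 1 - k) - a * (10 : Int) ^ (n - 1 - k))]
  rw [if_pos (by simp; omega), if_pos (by simp; omega)]
  have hwi : (L - 1 - i).toNat = n - 1 - i.toNat := by omega
  have hwj : (L - 1 - j).toNat = n - 1 - j.toNat := by omega
  rw [hwi, hwj, ← hn]
  ring

-- B's power-table lookup equals the power A recomputes
theorem pvPw_get (L i : Int) (h0 : 0 ≤ i) (hi : i < L) :
    PySem.List.pyGetD ((PySem.List.pyRange 0 L 1).map (fun k => (10 : Int) ^ ((L - 1 - k).toNat))) i 0
      = (10 : Int) ^ ((L - 1 - i).toNat) := by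
  have := PySem.List.pyGetD_map_pyRange_of_nonneg (fun k => (10 : Int) ^ ((L - 1 - k).toNat)) L i 0 h0 hi
  simpa using this

theorem pvBase_eq (num : List Int) (L : Int) :
    pvValA num L
      = (PySem.List.pyRange 0 L 1).foldl
          (fun acc i => acc + PySem.List.pyGetD num i 0 *
            PySem.List.pyGetD ((PySem.List.pyRange 0 L 1).map (fun k => (10 : Int) ^ ((L - 1 - k).toNat))) i 0) 0 := by
  unfold pvValA
  apply PySem.List.foldl_congr_mem
  intro acc x hx
  rw [PySem.List.mem_pyRange_one] at hx
  rw [pvPw_get L x hx.1 hx.2]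

-- the A-side inner/outer folds carry (cur, max, min) with cur always equal to num;
-- they simulate B's (max, min) fold.
theorem pvInner (num : List Int) (L i : Int) (hlen : L ≤ (num.length : Int))
    (base : Int) (hbase : base = pvValA num L) :
    ∀ (js : List Int) (_hjs : ∀ j ∈ js, 0 ≤ i ∧ i < j ∧ j < L) (mx mn : Int),
    js.foldl (fun st j =>
      if i = 0 ∧ PySem.List.pyGetD st.1 j 0 = 0 then st
      else if PySem.List.pyGetD st.1 i 0 ≠ PySem.List.pyGetD st.1 j 0 then
        (num,
         if st.2.1 < pvValA (PySem.List.pySetD (PySem.List.pySetD st.1 i (PySem.List.pyGetD st.1 j 0)) j (PySem.List.pyGetD st.1 i 0)) L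
           then pvValA (PySem.List.pySetD (PySem.List.pySetD st.1 i (PySem.List.pyGetD st.1 j 0)) j (PySem.List.pyGetD st.1 i 0)) L else st.2.1,
         if st.2.2 > pvValA (PySem.List.pySetD (PySem.List.pySetD st.1 i (PySem.List.pyGetD st.1 j 0)) j (PySem.List.pyGetD st.1 i 0)) L
           then pvValA (PySem.List.pySetD (PySem.List.pySetD st.1 i (PySem.List.pyGetD st.1 j 0)) j (PySem.List.pyGetD st.1 i 0)) L else st.2.2)
      else st) ((num, mx, mn) : List Int × Int × Int)
    = (num,
       js.foldl (fun st j =>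
         if i = 0 ∧ PySem.List.pyGetD num j 0 = 0 then st
         else if PySem.List.pyGetD num i 0 ≠ PySem.List.pyGetD num j 0 then
           (if st.1 < base + (PySem.List.pyGetD num j 0 - PySem.List.pyGetD num i 0) * (PySem.List.pyGetD ((PySem.List.pyRange 0 L 1).map (fun k => (10 : Int) ^ ((L - 1 - k).toNat))) i 0 - PySem.List.pyGetD ((PySem.List.pyRange 0 L 1).map (fun k => (10 : Int) ^ ((L - 1 - k).toNat))) j 0) then base + (PySem.List.pyGetD num j 0 - PySem.List.pyGetD num i 0) * (PySem.List.pyGetD ((PySem.List.pyRange 0 L 1).map (fun k => (10 : Int) ^ ((L - 1 - k).toNat))) i 0 - PySem.List.pyGetD ((PySem.List.pyRange 0 L 1).map (fun k => (10 : Int) ^ ((L - 1 - k).toNat))) j 0) else st.1,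
            if st.2 > base + (PySem.List.pyGetD num j 0 - PySem.List.pyGetD num i 0) * (PySem.List.pyGetD ((PySem.List.pyRange 0 L 1).map (fun k => (10 : Int) ^ ((L - 1 - k).toNat))) i 0 - PySem.List.pyGetD ((PySem.List.pyRange 0 L 1).map (fun k => (10 : Int) ^ ((L - 1 - k).toNat))) j 0) then base + (PySem.List.pyGetD num j 0 - PySem.List.pyGetD num i 0) * (PySem.List.pyGetD ((PySem.List.pyRange 0 L 1).map (fun k => (10 : Int) ^ ((L - 1 - k).toNat))) i 0 - PySem.List.pyGetD ((PySem.List.pyRange 0 L 1).map (fun k => (10 : Int) ^ ((L - 1 - k).toNat))) j 0) else st.2)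
         else st) ((mx, mn) : Int × Int)) := by
  intro js
  induction js with
  | nil => intro _ mx mn; rfl
  | cons j js ih =>
    intro hjs mx mn
    have hj := hjs j (by simp)
    obtain ⟨h0i, hij, hjL⟩ := hj
    have hrest : ∀ x ∈ js, 0 ≤ i ∧ i < x ∧ x < L := fun x hx => hjs x (by simp [hx])
    simp only [List.foldl_cons]
    by_cases hskip : i = 0 ∧ PySem.List.pyGetD num j 0 = 0
    · rw [if_pos hskip, if_pos hskip]
      exact ih hrest mx mn
    · rw [if_neg hskip, if_neg hskip]
      by_cases hne : PySem.List.pyGetD num i 0 ≠ PySem.List.pyGetD num j 0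
      · rw [if_pos hne, if_pos hne]
        have hcmp : pvValA (PySem.List.pySetD (PySem.List.pySetD num i (PySem.List.pyGetD num j 0)) j (PySem.List.pyGetD num i 0)) L
            = base + (PySem.List.pyGetD num j 0 - PySem.List.pyGetD num i 0)
                * (PySem.List.pyGetD ((PySem.List.pyRange 0 L 1).map (fun k => (10 : Int) ^ ((L - 1 - k).toNat))) i 0
                   - PySem.List.pyGetD ((PySem.List.pyRange 0 L 1).map (fun k => (10 : Int) ^ ((L - 1 - k).toNat))) j 0) := by
          rw [pvPw_get L i h0i (by omega), pvPw_get L j (by omega) hjL,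
              pvVal_swap num L i j h0i hij hjL hlen, ← hbase]
        rw [hcmp]
        exact ih hrest _ _
      · rw [if_neg hne, if_neg hne]
        exact ih hrest mx mn

theorem pvOuter (num : List Int) (L : Int) (hlen : L ≤ (num.length : Int))
    (base : Int) (hbase : base = pvValA num L) :
    ∀ (is : List Int) (_his : ∀ i ∈ is, 0 ≤ i ∧ i < L - 1) (mx mn : Int),
    is.foldl (fun st i =>
      (PySem.List.pyRange (i + 1) L 1).foldl (fun st j =>
        if i = 0 ∧ PySem.List.pyGetD st.1 j 0 = 0 then st
        else if PySem.List.pyGetD st.1 i 0 ≠ PySem.List.pyGetD st.1 j 0 then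
          (num,
           if st.2.1 < pvValA (PySem.List.pySetD (PySem.List.pySetD st.1 i (PySem.List.pyGetD st.1 j 0)) j (PySem.List.pyGetD st.1 i 0)) L
             then pvValA (PySem.List.pySetD (PySem.List.pySetD st.1 i (PySem.List.pyGetD st.1 j 0)) j (PySem.List.pyGetD st.1 i 0)) L else st.2.1,
           if st.2.2 > pvValA (PySem.List.pySetD (PySem.List.pySetD st.1 i (PySem.List.pyGetD st.1 j 0)) j (PySem.List.pyGetD st.1 i 0)) L
             then pvValA (PySem.List.pySetD (PySem.List.pySetD st.1 i (PySem.List.pyGetD st.1 j 0)) j (PySem.List.pyGetD st.1 i 0)) L else st.2.2)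
        else st) st) ((num, mx, mn) : List Int × Int × Int)
    = (num,
       is.foldl (fun st i =>
         (PySem.List.pyRange (i + 1) L 1).foldl (fun st j =>
           if i = 0 ∧ PySem.List.pyGetD num j 0 = 0 then st
           else if PySem.List.pyGetD num i 0 ≠ PySem.List.pyGetD num j 0 then
             (if st.1 < base + (PySem.List.pyGetD num j 0 - PySem.List.pyGetD num i 0) * (PySem.List.pyGetD ((PySem.List.pyRange 0 L 1).map (fun k => (10 : Int) ^ ((L - 1 - k).toNat))) i 0 - PySem.List.pyGetD ((PySem.List.pyRange 0 L 1).map (fun k => (10 : Int) ^ ((L - 1 - k).toNat))) j 0) then base + (PySem.List.pyGetD num j 0 - PySem.List.pyGetD num i 0) * (PySem.List.pyGetD ((PySem.List.pyRange 0 L 1).map (fun k => (10 : Int) ^ ((L - 1 - k).toNat))) i 0 - PySem.List.pyGetD ((PySem.List.pyRange 0 L 1).map (fun k => (10 : Int) ^ ((L - 1 - k).toNat))) j 0) else st.1,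
              if st.2 > base + (PySem.List.pyGetD num j 0 - PySem.List.pyGetD num i 0) * (PySem.List.pyGetD ((PySem.List.pyRange 0 L 1).map (fun k => (10 : Int) ^ ((L - 1 - k).toNat))) i 0 - PySem.List.pyGetD ((PySem.List.pyRange 0 L 1).map (fun k => (10 : Int) ^ ((L - 1 - k).toNat))) j 0) then base + (PySem.List.pyGetD num j 0 - PySem.List.pyGetD num i 0) * (PySem.List.pyGetD ((PySem.List.pyRange 0 L 1).map (fun k => (10 : Int) ^ ((L - 1 - k).toNat))) i 0 - PySem.List.pyGetD ((PySem.List.pyRange 0 L 1).map (fun k => (10 : Int) ^ ((L - 1 - k).toNat))) j 0) else st.2)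
           else st) st) ((mx, mn) : Int × Int)) := by
  intro is
  induction is with
  | nil => intro _ mx mn; rfl
  | cons i is ih =>
    intro his mx mn
    have hi := his i (by simp)
    have hrest : ∀ x ∈ is, 0 ≤ x ∧ x < L - 1 := fun x hx => his x (by simp [hx])
    simp only [List.foldl_cons]
    have hjs : ∀ j ∈ PySem.List.pyRange (i + 1) L 1, 0 ≤ i ∧ i < j ∧ j < L := by
      intro j hj
      rw [PySem.List.mem_pyRange_one] at hj
      exact ⟨hi.1, by omega, hj.2⟩
    rw [pvInner num L i hlen base hbase (PySem.List.pyRange (i + 1) L 1) hjs mx mn]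
    exact ih hrest _ _

-- ===== VERDICT (by name: the statement is the Claim_ definition above) =====
theorem solution_spec : Claim_equal_solution := by
  intro num L _ hpre
  unfold Spec_solution solution solution_alt
  by_cases hL : L ≤ 0
  · rw [PySem.List.pyRange_one_eq_nil (by omega)]
    simp [pvBase_eq num L]
  · have hlen : L ≤ (num.length : Int) := by
      rcases hpre with h | h
      · exact h
      · omega
    have his : ∀ i ∈ PySem.List.pyRange 0 (L - 1) 1, 0 ≤ i ∧ i < L - 1 := by
      intro i hi; rw [PySem.List.mem_pyRange_one] at hi; exact hi
    simp only
    rw [pvOuter num L hlen _ (pvBase_eq num L).symm (PySem.List.pyRange 0 (L - 1) 1) his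
          (pvValA num L) (pvValA num L)]
    rw [pvBase_eq num L]
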